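-- pv_equiv track=rewrite | github.com/robbyyt/actn-hw1 | hw2-rsa/utils.py | binary_gcd_inner
-- ===== SOURCE A (Python) =====
-- def binary_gcd_inner(u, v, x_1, y_1, a, b, c, d, g):
--     while u % 2 == 0:
--         u //= 2
--         if a % 2 == b % 2 == 0:
--             a //= 2
--             b //= 2
--         else:
--             a = (a + y_1) // 2
--             b = (b - x_1) // 2
--
--     while v % 2 == 0:
--         v //= 2
--         if c % 2 == d % 2 == 0:
--             c //= 2
--             d //= 2
--         else:
--             c = (c + y_1) // 2
--             d = (d - x_1) // 2
--
--     if u >= v: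
--         u -= v
--         a -= c
--         b -= d
--     else:
--         v -= u
--         c -= a
--         d -= b
--
--     if u == 0:
--         return c, d, g * v
--     else:
--         return binary_gcd_inner(u, v, x_1, y_1, a, b, c, d, g)
-- ===== SOURCE B (Python) =====
-- def binary_gcd_inner(u, v, x_1, y_1, a, b, c, d, g):
--     def strip(t, p, q):
--         # halve t while even, updating the coefficient pair (p, q)
--         while t % 2 == 0:
--             t //= 2
--             if p % 2 == 0 and q % 2 == 0:
--                 p //= 2
--                 q //= 2
--             else:
--                 p = (p + y_1) // 2
--                 q = (q - x_1) // 2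
--         return t, p, q
--
--     while True:
--         u, a, b = strip(u, a, b)
--         v, c, d = strip(v, c, d)
--         if u >= v:
--             u, a, b = u - v, a - c, b - d
--         else:
--             v, c, d = v - u, c - a, d - b
--         if u == 0:
--             return c, d, g * v
-- ===== Notes on version B (the rewrite author's own statement) =====
-- stated objective: simpler
-- what changed: The tail recursion with nine threaded arguments is replaced by an explicit while-True loop over the mutating six-variable state, and the two duplicated even-stripping while loops are factored into one shared strip helper.
import Mathlib
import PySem

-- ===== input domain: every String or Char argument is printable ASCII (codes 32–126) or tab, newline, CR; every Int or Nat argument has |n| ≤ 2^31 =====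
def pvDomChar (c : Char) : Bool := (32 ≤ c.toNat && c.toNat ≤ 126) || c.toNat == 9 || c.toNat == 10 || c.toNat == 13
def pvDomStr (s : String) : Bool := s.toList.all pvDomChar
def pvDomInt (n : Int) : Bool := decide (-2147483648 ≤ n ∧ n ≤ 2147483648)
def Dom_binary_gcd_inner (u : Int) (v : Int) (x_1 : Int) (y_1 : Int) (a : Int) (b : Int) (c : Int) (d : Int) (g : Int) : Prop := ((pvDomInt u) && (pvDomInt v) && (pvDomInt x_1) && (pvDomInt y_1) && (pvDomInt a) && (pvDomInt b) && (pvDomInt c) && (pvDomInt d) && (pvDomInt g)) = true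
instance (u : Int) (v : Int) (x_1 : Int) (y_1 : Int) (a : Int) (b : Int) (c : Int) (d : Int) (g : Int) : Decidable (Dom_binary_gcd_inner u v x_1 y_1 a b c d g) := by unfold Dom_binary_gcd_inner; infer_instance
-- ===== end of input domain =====

-- B rewrites A's tail recursion as an explicit while-True loop over the mutating
-- 6-tuple state with one shared even-stripping helper (objective: simpler).
-- Both programs diverge identically outside Pre_; the Lean ports use a fuel/guard
-- bound there purely to be total — the proof of equivalence holds for every fuel.

-- termination helper for the even-stripping loops (cited by name in decreasing_by)
theorem pvHalveLt (u : Int) (h : PySem.Int.mod u 2 = 0 ∧ u ≠ 0) :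
    (PySem.Int.floordiv u 2).natAbs < u.natAbs := by
  rw [PySem.Int.floordiv_eq_ediv_of_pos (by omega)]
  rw [PySem.Int.mod_eq_emod_of_pos (by omega)] at h
  omega

-- ===== PORT A =====
-- first while loop of A: strip factors of 2 from u, adjusting a, b
-- (the `t ≠ 0` conjunct only makes the function total: Python loops forever at 0)
def pvAStripU (x_1 y_1 : Int) (u a b : Int) : Int × Int × Int :=
  if h : PySem.Int.mod u 2 = 0 ∧ u ≠ 0 then
    if PySem.Int.mod a 2 = PySem.Int.mod b 2 ∧ PySem.Int.mod b 2 = 0 then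
      pvAStripU x_1 y_1 (PySem.Int.floordiv u 2) (PySem.Int.floordiv a 2) (PySem.Int.floordiv b 2)
    else
      pvAStripU x_1 y_1 (PySem.Int.floordiv u 2) (PySem.Int.floordiv (a + y_1) 2) (PySem.Int.floordiv (b - x_1) 2)
  else (u, a, b)
termination_by u.natAbs
decreasing_by all_goals exact pvHalveLt u h

-- second while loop of A: strip factors of 2 from v, adjusting c, d
def pvAStripV (x_1 y_1 : Int) (v c d : Int) : Int × Int × Int :=
  if h : PySem.Int.mod v 2 = 0 ∧ v ≠ 0 then
    if PySem.Int.mod c 2 = PySem.Int.mod d 2 ∧ PySem.Int.mod d 2 = 0 then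
      pvAStripV x_1 y_1 (PySem.Int.floordiv v 2) (PySem.Int.floordiv c 2) (PySem.Int.floordiv d 2)
    else
      pvAStripV x_1 y_1 (PySem.Int.floordiv v 2) (PySem.Int.floordiv (c + y_1) 2) (PySem.Int.floordiv (d - x_1) 2)
  else (v, c, d)
termination_by v.natAbs
decreasing_by all_goals exact pvHalveLt v h

-- A's tail recursion; fuel only makes it total (never exhausted inside Pre_)
def pvAGo (fuel : Nat) (u v x_1 y_1 a b c d g : Int) : Int × Int × Int :=
  match fuel with
  | 0 => (0, 0, 0)
  | fuel + 1 =>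
    let (u, a, b) := pvAStripU x_1 y_1 u a b
    let (v, c, d) := pvAStripV x_1 y_1 v c d
    if u ≥ v then
      let u := u - v
      let a := a - c
      let b := b - d
      if u = 0 then (c, d, g * v) else pvAGo fuel u v x_1 y_1 a b c d g
    else
      let v := v - u
      let c := c - a
      let d := d - b
      if u = 0 then (c, d, g * v) else pvAGo fuel u v x_1 y_1 a b c d g

def binary_gcd_inner (u : Int) (v : Int) (x_1 : Int) (y_1 : Int) (a : Int) (b : Int) (c : Int) (d : Int) (g : Int) : Int × Int × Int :=
  pvAGo (u.natAbs + v.natAbs + 1) u v x_1 y_1 a b c d g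

-- ===== PORT B =====
-- B's single shared strip helper (the `t ≠ 0` conjunct only makes it total)
def pvBStrip (x_1 y_1 : Int) (t p q : Int) : Int × Int × Int :=
  if h : PySem.Int.mod t 2 = 0 ∧ t ≠ 0 then
    if PySem.Int.mod p 2 = 0 ∧ PySem.Int.mod q 2 = 0 then
      pvBStrip x_1 y_1 (PySem.Int.floordiv t 2) (PySem.Int.floordiv p 2) (PySem.Int.floordiv q 2)
    else
      pvBStrip x_1 y_1 (PySem.Int.floordiv t 2) (PySem.Int.floordiv (p + y_1) 2) (PySem.Int.floordiv (q - x_1) 2)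
  else (t, p, q)
termination_by t.natAbs
decreasing_by all_goals exact pvHalveLt t h

-- B's `while True:` body over the mutating state (u, v, a, b, c, d);
-- x_1, y_1, g stay fixed; fuel only makes the loop total
def pvBLoop (fuel : Nat) (x_1 y_1 g : Int) (st : Int × Int × Int × Int × Int × Int) : Int × Int × Int :=
  match fuel with
  | 0 => (0, 0, 0)
  | fuel + 1 =>
    let (u, v, a, b, c, d) := st
    let (u, a, b) := pvBStrip x_1 y_1 u a b
    let (v, c, d) := pvBStrip x_1 y_1 v c d
    let (u, v, a, b, c, d) :=
      if u ≥ v then (u - v, v, a - c, b - d, c, d)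
      else (u, v - u, a, b, c - a, d - b)
    if u = 0 then (c, d, g * v)
    else pvBLoop fuel x_1 y_1 g (u, v, a, b, c, d)

def binary_gcd_inner_alt (u : Int) (v : Int) (x_1 : Int) (y_1 : Int) (a : Int) (b : Int) (c : Int) (d : Int) (g : Int) : Int × Int × Int :=
  pvBLoop (u.natAbs + v.natAbs + 1) x_1 y_1 g (u, v, a, b, c, d)

-- ===== PRECONDITION & SPEC =====
-- odd part of a natural number (largest odd divisor); a standard arithmetic helper
-- used only to state Pre_ below, independent of both ports
def pvOddPart (n : Nat) : Nat :=
  if h : n % 2 = 0 ∧ n ≠ 0 then pvOddPart (n / 2) else n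
termination_by n
decreasing_by exact Nat.div_lt_self (Nat.pos_of_ne_zero h.2) (by omega)

-- Pre_ = exactly the inputs on which the Python A RETURNS: both positive, or both
-- negative with equal odd parts (then the first subtraction makes u zero). On every
-- other input A recurses forever (u = 0 or v = 0 spins in an even-stripping while
-- loop; with mixed signs or unequal negative odd parts, u - v grows and never hits 0),
-- so nothing A returns on is excluded.
def Pre_binary_gcd_inner (u : Int) (v : Int) (x_1 : Int) (y_1 : Int) (a : Int) (b : Int) (c : Int) (d : Int) (g : Int) : Prop :=
  (0 < u ∧ 0 < v) ∨ (u < 0 ∧ v < 0 ∧ pvOddPart u.natAbs = pvOddPart v.natAbs)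
instance (u : Int) (v : Int) (x_1 : Int) (y_1 : Int) (a : Int) (b : Int) (c : Int) (d : Int) (g : Int) : Decidable (Pre_binary_gcd_inner u v x_1 y_1 a b c d g) := by unfold Pre_binary_gcd_inner; infer_instance
def pvWitness_binary_gcd_inner : Int × Int × Int × Int × Int × Int × Int × Int × Int := (12, 8, 12, 8, 1, 0, 0, 1, 1)

def Spec_binary_gcd_inner (u : Int) (v : Int) (x_1 : Int) (y_1 : Int) (a : Int) (b : Int) (c : Int) (d : Int) (g : Int) (out : Int × Int × Int) : Prop := out = binary_gcd_inner_alt u v x_1 y_1 a b c d g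
instance (u : Int) (v : Int) (x_1 : Int) (y_1 : Int) (a : Int) (b : Int) (c : Int) (d : Int) (g : Int) (out : Int × Int × Int) : Decidable (Spec_binary_gcd_inner u v x_1 y_1 a b c d g out) := by unfold Spec_binary_gcd_inner; infer_instance

-- ===== CLAIM (what is proved, stated in full; the proofs are below) =====
def Claim_equal_binary_gcd_inner : Prop := ∀ (u : Int) (v : Int) (x_1 : Int) (y_1 : Int) (a : Int) (b : Int) (c : Int) (d : Int) (g : Int), Dom_binary_gcd_inner u v x_1 y_1 a b c d g → Pre_binary_gcd_inner u v x_1 y_1 a b c d g → Spec_binary_gcd_inner u v x_1 y_1 a b c d g (binary_gcd_inner u v x_1 y_1 a b c d g)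

-- ===== LEMMAS AND PROOFS =====

theorem stripU_eq_strip (x_1 y_1 u a b : Int) :
    pvAStripU x_1 y_1 u a b = pvBStrip x_1 y_1 u a b := by
  fun_induction pvAStripU x_1 y_1 u a b with
  | case1 u a b h hc ih =>
    rw [pvBStrip]
    have hc' : PySem.Int.mod a 2 = 0 ∧ PySem.Int.mod b 2 = 0 := ⟨hc.2 ▸ hc.1, hc.2⟩
    simp only [dif_pos h, if_pos hc']
    exact ih
  | case2 u a b h hc ih =>
    rw [pvBStrip]
    have hc' : ¬ (PySem.Int.mod a 2 = 0 ∧ PySem.Int.mod b 2 = 0) := by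
      intro ⟨ha, hb⟩; exact hc ⟨ha.trans hb.symm, hb⟩
    simp only [dif_pos h, if_neg hc']
    exact ih
  | case3 u a b h =>
    rw [pvBStrip]
    simp only [dif_neg h]

theorem stripV_eq_strip (x_1 y_1 v c d : Int) :
    pvAStripV x_1 y_1 v c d = pvBStrip x_1 y_1 v c d := by
  fun_induction pvAStripV x_1 y_1 v c d with
  | case1 v c d h hc ih =>
    rw [pvBStrip]
    have hc' : PySem.Int.mod c 2 = 0 ∧ PySem.Int.mod d 2 = 0 := ⟨hc.2 ▸ hc.1, hc.2⟩
    simp only [dif_pos h, if_pos hc']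
    exact ih
  | case2 v c d h hc ih =>
    rw [pvBStrip]
    have hc' : ¬ (PySem.Int.mod c 2 = 0 ∧ PySem.Int.mod d 2 = 0) := by
      intro ⟨hcc, hdd⟩; exact hc ⟨hcc.trans hdd.symm, hdd⟩
    simp only [dif_pos h, if_neg hc']
    exact ih
  | case3 v c d h =>
    rw [pvBStrip]
    simp only [dif_neg h]

theorem go_eq_loop (fuel : Nat) (u v x_1 y_1 a b c d g : Int) :
    pvAGo fuel u v x_1 y_1 a b c d g = pvBLoop fuel x_1 y_1 g (u, v, a, b, c, d) := by
  induction fuel generalizing u v a b c d with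
  | zero => rfl
  | succ fuel ih =>
    rw [pvAGo, pvBLoop]
    simp only [stripU_eq_strip, stripV_eq_strip]
    obtain ⟨u', a', b'⟩ := pvBStrip x_1 y_1 u a b
    obtain ⟨v', c', d'⟩ := pvBStrip x_1 y_1 v c d
    by_cases huv : u' ≥ v' <;> simp only [if_pos, if_neg, huv, ite_true, ite_false] <;>
      split <;> simp [ih]

-- ===== VERDICT (by name: the statement is the Claim_ definition above) =====
theorem binary_gcd_inner_spec : Claim_equal_binary_gcd_inner := by
  intro u v x_1 y_1 a b c d g _ _
  unfold Spec_binary_gcd_inner binary_gcd_inner binary_gcd_inner_alt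
  exact go_eq_loop _ u v x_1 y_1 a b c d g
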